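-- pv_equiv track=rewrite | github.com/opentaproject/openta-public | django/backend/exercises/questiontypes/symbolic/string_formatting.py | absify
-- ===== SOURCE A (Python) =====
-- def absify(expression):  # {{{
--     l = len(expression)
--     i = 0
--     s = ''
--     depth = 0
--     while i < l:
--         c = expression[i]
--         if c == '|':
--             if depth == 0:
--                 s += " abs( "
--                 depth = -1
--             elif depth == -1:
--                 depth = 0
--         else:
--             s += expression[i]
--         if c == '|' and depth == 0:
--             s += " ) "
--         i += 1
--     if depth == 0:
--         return s
--     else:
--         return expression  # }}}
-- ===== SOURCE B (Python) =====
-- def absify(expression):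
--     # Split on the delimiter and reassemble; an odd delimiter count means an
--     # unclosed pair, in which case the expression is returned unchanged.
--     parts = expression.split('|')
--     if len(parts) % 2 == 0:  # odd number of '|' delimiters
--         return expression
--     out = [parts[0]]
--     for k in range(1, len(parts), 2):
--         out.append(" abs( " + parts[k] + " ) " + parts[k + 1])
--     return "".join(out)
-- ===== Notes on version B (the rewrite author's own statement) =====
-- stated objective: faster
-- what changed: A's character-by-character scan with a depth-toggle state machine and repeated string concatenation is replaced by splitting on the delimiter and reassembling the segments in pairs with one join, returning the input unchanged when the delimiter count is odd.
import Mathlib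
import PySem

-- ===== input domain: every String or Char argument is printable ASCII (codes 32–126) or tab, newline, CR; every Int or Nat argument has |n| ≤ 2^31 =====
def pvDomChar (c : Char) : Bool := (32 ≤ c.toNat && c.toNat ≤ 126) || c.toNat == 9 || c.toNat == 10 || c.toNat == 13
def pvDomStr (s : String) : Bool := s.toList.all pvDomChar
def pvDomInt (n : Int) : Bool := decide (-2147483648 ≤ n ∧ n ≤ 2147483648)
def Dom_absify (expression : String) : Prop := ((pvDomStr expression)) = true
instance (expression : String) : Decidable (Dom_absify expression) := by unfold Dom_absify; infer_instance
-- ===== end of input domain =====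

-- B replaces A's char-scan depth-toggle state machine (with repeated string concatenation) by split('|') + pairwise reassembly with one join; measured faster.

-- ===== PORT A =====
-- A's while loop over expression[i] with accumulator s and depth flag, transcribed as structural recursion over the char list.
def absifyLoopA (expr : String) : List Char → List Char → Int → String
  | [], s, depth => if depth = 0 then String.mk s else expr
  | c :: cs, s, depth =>
    let sd : List Char × Int :=
      if c = '|' then
        if depth = 0 then (s ++ " abs( ".toList, (-1 : Int))
        else if depth = -1 then (s, 0)
        else (s, depth)
      else (s ++ [c], depth)
    let s' := if c = '|' ∧ sd.2 = 0 then sd.1 ++ " ) ".toList else sd.1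
    absifyLoopA expr cs s' sd.2

def absify (expression : String) : String :=
  absifyLoopA expression expression.toList [] 0

-- ===== PORT B =====
-- the for-loop over range(1, len(parts), 2): each step consumes parts[k], parts[k+1]
def pairsB : List (List Char) → List Char
  | inner :: outer :: rest => " abs( ".toList ++ inner ++ " ) ".toList ++ outer ++ pairsB rest
  | _ => []

def absify_alt (expression : String) : String :=
  let parts := PySem.Chars.splitOn expression.toList "|".toList
  if parts.length % 2 = 0 then expression
  else
    match parts with
    | p0 :: rest => String.mk (p0 ++ pairsB rest)
    | [] => expression

-- ===== PRECONDITION & SPEC =====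
def Spec_absify (expression : String) (out : String) : Prop := out = absify_alt expression
instance (expression : String) (out : String) : Decidable (Spec_absify expression out) := by unfold Spec_absify; infer_instance

-- ===== CLAIM (what is proved, stated in full; the proofs are below) =====
def Claim_equal_absify : Prop := ∀ (expression : String), Dom_absify expression → Spec_absify expression (absify expression)

-- ===== LEMMAS AND PROOFS =====

-- simple reference split on '|'
def splitBar : List Char → List (List Char)
  | [] => [[]]
  | c :: cs =>
    if c = '|' then [] :: splitBar cs
    else
      match splitBar cs with
      | s :: ss => (c :: s) :: ss
      | [] => [[c]]

lemma splitBar_ne_nil (cs : List Char) : splitBar cs ≠ [] := by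
  cases cs with
  | nil => simp [splitBar]
  | cons c cs =>
    simp only [splitBar]
    split
    · simp
    · split <;> simp

lemma splitOn_go_eq (fuel : Nat) (l cur : List Char) (acc : List (List Char))
    (h : l.length ≤ fuel) :
    PySem.Chars.splitOn.go "|".toList fuel l cur acc =
      acc.reverse ++ (splitBar l).modifyHead (cur.reverse ++ ·) := by
  induction fuel generalizing l cur acc with
  | zero =>
    interval_cases hl : l.length
    · simp at hl; subst hl
      simp [PySem.Chars.splitOn.go, splitBar]
  | succ fuel ih =>
    cases l with
    | nil => simp [PySem.Chars.splitOn.go, splitBar]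
    | cons c cs =>
      by_cases hc : c = '|'
      · subst hc
        rw [show PySem.Chars.splitOn.go "|".toList (fuel+1) ('|' :: cs) cur acc =
            PySem.Chars.splitOn.go "|".toList fuel cs [] (cur.reverse :: acc) from by
          simp [PySem.Chars.splitOn.go, List.isPrefixOf]]
        rw [ih cs [] _ (by simpa using Nat.le_of_succ_le_succ (by simpa using h))]
        cases hsb : splitBar cs with
        | nil => exact absurd hsb (splitBar_ne_nil cs)
        | cons s ss => simp [splitBar, hsb]
      · rw [show PySem.Chars.splitOn.go "|".toList (fuel+1) (c :: cs) cur acc =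
            PySem.Chars.splitOn.go "|".toList fuel cs (c :: cur) acc from by
          simp [PySem.Chars.splitOn.go, List.isPrefixOf]; intro h; exact absurd h.symm hc]
        rw [ih cs (c :: cur) _ (by simpa using Nat.le_of_succ_le_succ (by simpa using h))]
        cases hsb : splitBar cs with
        | nil => exact absurd hsb (splitBar_ne_nil cs)
        | cons s ss => simp [splitBar, hc, hsb]

lemma splitOn_eq_splitBar (cs : List Char) :
    PySem.Chars.splitOn cs "|".toList = splitBar cs := by
  rw [PySem.Chars.splitOn, splitOn_go_eq _ _ _ _ (Nat.le_succ _)]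
  cases hsb : splitBar cs with
  | nil => exact absurd hsb (splitBar_ne_nil cs)
  | cons s ss => simp

-- the key loop invariant: A's scan from depth 0 / depth -1 in terms of splitBar
lemma loopA_eq (expr : String) (cs : List Char) : ∀ s : List Char,
    (absifyLoopA expr cs s 0 =
      (if (splitBar cs).length % 2 = 0 then expr
       else String.mk (s ++ (splitBar cs).headI ++ pairsB (splitBar cs).tail))) ∧
    (absifyLoopA expr cs s (-1) =
      (if (splitBar cs).length % 2 = 1 then expr
       else String.mk (s ++ (splitBar cs).headI ++ " ) ".toList ++
         ((splitBar cs).tail.headI ++ pairsB (splitBar cs).tail.tail)))) := by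
  induction cs with
  | nil => intro s; simp [absifyLoopA, splitBar, pairsB]
  | cons c cs ih =>
    intro s
    by_cases hc : c = '|'
    · subst hc
      constructor
      · rw [show absifyLoopA expr ('|' :: cs) s 0 =
            absifyLoopA expr cs (s ++ " abs( ".toList) (-1) from by
          simp [absifyLoopA]]
        rw [(ih (s ++ " abs( ".toList)).2]
        cases hsb : splitBar cs with
        | nil => exact absurd hsb (splitBar_ne_nil cs)
        | cons p ps =>
          by_cases hpar : (p :: ps).length % 2 = 1
          · simp [splitBar, hsb]
            split_ifs <;> first | rfl | (simp [List.length] at *; omega)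
          · have h0 : (p :: ps).length % 2 = 0 := by omega
            cases ps with
            | nil => simp at h0
            | cons q qs =>
              simp [splitBar, hsb, pairsB]
              split_ifs <;> first | rfl | omega
      · rw [show absifyLoopA expr ('|' :: cs) s (-1) =
            absifyLoopA expr cs (s ++ " ) ".toList) 0 from by
          simp [absifyLoopA]]
        rw [(ih (s ++ " ) ".toList)).1]
        cases hsb : splitBar cs with
        | nil => exact absurd hsb (splitBar_ne_nil cs)
        | cons p ps =>
          by_cases hpar : (p :: ps).length % 2 = 0
          · simp [splitBar, hsb]
            split_ifs <;> first | rfl | omega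
          · simp [splitBar, hsb]
            split_ifs <;> first | rfl | omega
    · have step : ∀ d : Int, absifyLoopA expr (c :: cs) s d =
          absifyLoopA expr cs (s ++ [c]) d := by
        intro d; simp [absifyLoopA, hc]
      constructor
      · rw [step, (ih (s ++ [c])).1]
        cases hsb : splitBar cs with
        | nil => exact absurd hsb (splitBar_ne_nil cs)
        | cons p ps => simp [splitBar, hc, hsb]
      · rw [step, (ih (s ++ [c])).2]
        cases hsb : splitBar cs with
        | nil => exact absurd hsb (splitBar_ne_nil cs)
        | cons p ps => simp [splitBar, hc, hsb]

-- ===== VERDICT (by name: the statement is the Claim_ definition above) =====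
theorem absify_spec : Claim_equal_absify := by
  intro expression _
  unfold Spec_absify absify absify_alt
  rw [splitOn_eq_splitBar, (loopA_eq expression expression.toList []).1]
  cases hsb : splitBar expression.toList with
  | nil => exact absurd hsb (splitBar_ne_nil _)
  | cons p ps => by_cases hpar : (p :: ps).length % 2 = 0 <;> simp
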